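-- pv_equiv track=rewrite | github.com/Rachel-0627/E-commerce-Recommender | scripts/generate_sample_events.py | _profile_for_user
-- ===== SOURCE A (Python) =====
-- SYNTHETIC_USER_GROUPS = {
--     "runner": {
--         "users": [f"u_runner_{index:03d}" for index in range(1, 25)],
--         "preferred_categories": {"运动鞋", "健身装备"},
--         "preferred_features": {"跑步", "训练", "缓震", "透气", "长跑", "支撑"},
--     },
--     "home": {
--         "users": [f"u_home_{index:03d}" for index in range(1, 25)],
--         "preferred_categories": {"厨房", "收纳"},
--         "preferred_features": {"咖啡", "厨房", "家居", "收纳", "办公"},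
--     },
--     "mixed": {
--         "users": [f"u_mixed_{index:03d}" for index in range(1, 13)],
--         "preferred_categories": {"运动鞋", "健身装备", "厨房", "收纳"},
--         "preferred_features": {"跑步", "透气", "咖啡", "家居", "办公"},
--     },
--     "beauty": {
--         "users": [f"u_beauty_{index:03d}" for index in range(1, 20)],
--         "preferred_categories": {"护肤", "彩妆"},
--         "preferred_features": {"补水", "保湿", "抗老", "防晒", "玻尿酸", "成分党", "维C", "敏感肌"},
--     },
--     "tech": {
--         "users": [f"u_tech_{index:03d}" for index in range(1, 20)],
--         "preferred_categories": {"耳机", "智能设备", "电脑配件", "音频设备", "电源配件"},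
--         "preferred_features": {"降噪", "无线", "快充", "Type-C", "机械键盘", "高音质", "办公"},
--     },
--     "pet": {
--         "users": [f"u_pet_{index:03d}" for index in range(1, 16)],
--         "preferred_categories": {"宠物用品", "宠物食品", "宠物玩具", "宠物保健"},
--         "preferred_features": {"猫咪", "冻干", "无添加", "自动喂食", "营养", "益生菌", "宠物健康"},
--     },
-- }
--
-- def _profile_for_user(user_id: str) -> dict[str, set[str]]:
--     if user_id == "u_001":
--         return {
--             "categories": {"运动鞋", "健身装备"},
--             "features": {"跑步", "马拉松", "缓震", "透气", "长跑", "支撑"},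
--         }
--
--     if user_id == "u_002":
--         return {
--             "categories": {"家居", "收纳", "厨房"},
--             "features": {"咖啡", "餐具", "厨房", "家居", "收纳", "办公"},
--         }
--
--     if user_id == "u_003":
--         return {
--             "categories": {"护肤", "彩妆"},
--             "features": {"玻尿酸", "补水", "保湿", "抗老", "防晒", "维C", "敏感肌", "成分党"},
--         }
--
--     if user_id == "u_004":
--         return {
--             "categories": {"耳机", "智能设备", "电脑配件", "音频设备", "电源配件"},
--             "features": {"降噪", "无线", "LDAC", "高音质", "机械键盘", "快充", "Type-C", "办公"},
--         }
--
--     if user_id == "u_005":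
--         return {
--             "categories": {"宠物用品", "宠物食品", "宠物玩具", "宠物保健"},
--             "features": {"猫咪", "冻干", "无添加", "自动喂食", "营养", "益生菌", "宠物健康", "高蛋白"},
--         }
--
--     for group_name, group in SYNTHETIC_USER_GROUPS.items():
--         if user_id in group["users"]:
--             return {
--                 "categories": set(group["preferred_categories"]),
--                 "features": set(group["preferred_features"]),
--             }
--
--     return {"categories": set(), "features": set()}
-- ===== SOURCE B (Python) =====
-- SYNTHETIC_USER_GROUPS = {
--     "runner": {
--         "users": [f"u_runner_{index:03d}" for index in range(1, 25)],
--         "preferred_categories": {"运动鞋", "健身装备"},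
--         "preferred_features": {"跑步", "训练", "缓震", "透气", "长跑", "支撑"},
--     },
--     "home": {
--         "users": [f"u_home_{index:03d}" for index in range(1, 25)],
--         "preferred_categories": {"厨房", "收纳"},
--         "preferred_features": {"咖啡", "厨房", "家居", "收纳", "办公"},
--     },
--     "mixed": {
--         "users": [f"u_mixed_{index:03d}" for index in range(1, 13)],
--         "preferred_categories": {"运动鞋", "健身装备", "厨房", "收纳"},
--         "preferred_features": {"跑步", "透气", "咖啡", "家居", "办公"},
--     },
--     "beauty": {
--         "users": [f"u_beauty_{index:03d}" for index in range(1, 20)],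
--         "preferred_categories": {"护肤", "彩妆"},
--         "preferred_features": {"补水", "保湿", "抗老", "防晒", "玻尿酸", "成分党", "维C", "敏感肌"},
--     },
--     "tech": {
--         "users": [f"u_tech_{index:03d}" for index in range(1, 20)],
--         "preferred_categories": {"耳机", "智能设备", "电脑配件", "音频设备", "电源配件"},
--         "preferred_features": {"降噪", "无线", "快充", "Type-C", "机械键盘", "高音质", "办公"},
--     },
--     "pet": {
--         "users": [f"u_pet_{index:03d}" for index in range(1, 16)],
--         "preferred_categories": {"宠物用品", "宠物食品", "宠物玩具", "宠物保健"},
--         "preferred_features": {"猫咪", "冻干", "无添加", "自动喂食", "营养", "益生菌", "宠物健康"},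
--     },
-- }
--
-- # Precomputed table: user_id -> (categories, features); built once at module load.
-- _PROFILES = {
--     "u_001": ({"运动鞋", "健身装备"},
--               {"跑步", "马拉松", "缓震", "透气", "长跑", "支撑"}),
--     "u_002": ({"家居", "收纳", "厨房"},
--               {"咖啡", "餐具", "厨房", "家居", "收纳", "办公"}),
--     "u_003": ({"护肤", "彩妆"},
--               {"玻尿酸", "补水", "保湿", "抗老", "防晒", "维C", "敏感肌", "成分党"}),
--     "u_004": ({"耳机", "智能设备", "电脑配件", "音频设备", "电源配件"},
--               {"降噪", "无线", "LDAC", "高音质", "机械键盘", "快充", "Type-C", "办公"}),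
--     "u_005": ({"宠物用品", "宠物食品", "宠物玩具", "宠物保健"},
--               {"猫咪", "冻干", "无添加", "自动喂食", "营养", "益生菌", "宠物健康", "高蛋白"}),
-- }
-- for _group in SYNTHETIC_USER_GROUPS.values():
--     _pair = (_group["preferred_categories"], _group["preferred_features"])
--     for _user in _group["users"]:
--         _PROFILES[_user] = _pair
--
--
-- def _profile_for_user(user_id: str) -> dict[str, set[str]]:
--     cats, feats = _PROFILES.get(user_id, ((), ()))
--     return {"categories": set(cats), "features": set(feats)}
-- ===== Notes on version B (the rewrite author's own statement) =====
-- stated objective: simpler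
-- what changed: Replaces the five literal if-branches plus the linear scan over SYNTHETIC_USER_GROUPS by a single user_id -> profile dict built once at module load, so the function body is one dict lookup with a default.
import Mathlib
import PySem

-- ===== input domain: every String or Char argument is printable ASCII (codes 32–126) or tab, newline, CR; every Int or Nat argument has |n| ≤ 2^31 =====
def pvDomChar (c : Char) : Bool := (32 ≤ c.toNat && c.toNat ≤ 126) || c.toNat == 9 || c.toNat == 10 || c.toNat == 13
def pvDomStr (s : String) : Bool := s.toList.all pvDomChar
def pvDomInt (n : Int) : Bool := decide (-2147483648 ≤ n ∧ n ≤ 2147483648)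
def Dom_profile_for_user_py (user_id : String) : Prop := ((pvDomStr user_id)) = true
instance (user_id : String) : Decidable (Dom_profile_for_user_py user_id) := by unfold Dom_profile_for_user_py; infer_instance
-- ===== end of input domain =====

-- B replaces A's five if-branches plus linear group scan by a single precomputed
-- user_id -> profile table built once at module load; objective: simpler (one lookup).

-- shared module-level constant SYNTHETIC_USER_GROUPS (used by both Pythons):
-- each group is (name, (users, (preferred_categories, preferred_features))).
-- f"u_{name}_{index:03d}" (indices here are 1..24, so pad to width 3)
def pvFmt3 (i : Int) : String :=
  let s := PySem.Int.toStr i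
  String.ofList (List.replicate (3 - s.length) '0') ++ s

def pvUsers (name : String) (lo hi : Int) : List String :=
  (PySem.List.pyRange lo hi 1).map (fun i => "u_" ++ name ++ "_" ++ pvFmt3 i)

def pvGroups : List (String × (List String × (List String × List String))) :=
  [ ("runner", (pvUsers "runner" 1 25,
      (["运动鞋", "健身装备"],
       ["跑步", "训练", "缓震", "透气", "长跑", "支撑"]))),
    ("home", (pvUsers "home" 1 25,
      (["厨房", "收纳"],
       ["咖啡", "厨房", "家居", "收纳", "办公"]))),
    ("mixed", (pvUsers "mixed" 1 13,
      (["运动鞋", "健身装备", "厨房", "收纳"],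
       ["跑步", "透气", "咖啡", "家居", "办公"]))),
    ("beauty", (pvUsers "beauty" 1 20,
      (["护肤", "彩妆"],
       ["补水", "保湿", "抗老", "防晒", "玻尿酸", "成分党", "维C", "敏感肌"]))),
    ("tech", (pvUsers "tech" 1 20,
      (["耳机", "智能设备", "电脑配件", "音频设备", "电源配件"],
       ["降噪", "无线", "快充", "Type-C", "机械键盘", "高音质", "办公"]))),
    ("pet", (pvUsers "pet" 1 16,
      (["宠物用品", "宠物食品", "宠物玩具", "宠物保健"],
       ["猫咪", "冻干", "无添加", "自动喂食", "营养", "益生菌", "宠物健康"]))) ]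

-- ===== PORT A =====
-- A's 'for group_name, group in SYNTHETIC_USER_GROUPS.items(): if user_id in group["users"]: return …'
def pvScanGroups (gs : List (String × (List String × (List String × List String))))
    (user_id : String) : List (String × List String) :=
  match gs with
  | [] => [("categories", []), ("features", [])]
  | g :: rest =>
      if user_id ∈ g.2.1 then
        [("categories", g.2.2.1), ("features", g.2.2.2)]
      else pvScanGroups rest user_id

def profile_for_user_py (user_id : String) : List (String × List String) :=
  if user_id = "u_001" then
    [("categories", ["运动鞋", "健身装备"]),
     ("features", ["跑步", "马拉松", "缓震", "透气", "长跑", "支撑"])]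
  else if user_id = "u_002" then
    [("categories", ["家居", "收纳", "厨房"]),
     ("features", ["咖啡", "餐具", "厨房", "家居", "收纳", "办公"])]
  else if user_id = "u_003" then
    [("categories", ["护肤", "彩妆"]),
     ("features", ["玻尿酸", "补水", "保湿", "抗老", "防晒", "维C", "敏感肌", "成分党"])]
  else if user_id = "u_004" then
    [("categories", ["耳机", "智能设备", "电脑配件", "音频设备", "电源配件"]),
     ("features", ["降噪", "无线", "LDAC", "高音质", "机械键盘", "快充", "Type-C", "办公"])]
  else if user_id = "u_005" then
    [("categories", ["宠物用品", "宠物食品", "宠物玩具", "宠物保健"]),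
     ("features", ["猫咪", "冻干", "无添加", "自动喂食", "营养", "益生菌", "宠物健康", "高蛋白"])]
  else
    pvScanGroups pvGroups user_id

-- ===== PORT B =====
-- the module-level dict literal of the five explicit users
def pvBaseDict : PySem.Dict String (List String × List String) :=
  ((((PySem.Dict.empty.insert "u_001"
      (["运动鞋", "健身装备"],
       ["跑步", "马拉松", "缓震", "透气", "长跑", "支撑"])).insert "u_002"
      (["家居", "收纳", "厨房"],
       ["咖啡", "餐具", "厨房", "家居", "收纳", "办公"])).insert "u_003"
      (["护肤", "彩妆"],
       ["玻尿酸", "补水", "保湿", "抗老", "防晒", "维C", "敏感肌", "成分党"])).insert "u_004"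
      (["耳机", "智能设备", "电脑配件", "音频设备", "电源配件"],
       ["降噪", "无线", "LDAC", "高音质", "机械键盘", "快充", "Type-C", "办公"])).insert "u_005"
      (["宠物用品", "宠物食品", "宠物玩具", "宠物保健"],
       ["猫咪", "冻干", "无添加", "自动喂食", "营养", "益生菌", "宠物健康", "高蛋白"])

-- 'for _group in SYNTHETIC_USER_GROUPS.values(): for _user in _group["users"]: _PROFILES[_user] = _pair'
def pvPROFILES : PySem.Dict String (List String × List String) :=
  pvGroups.foldl (fun d g => g.2.1.foldl (fun d u => d.insert u g.2.2) d) pvBaseDict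

def profile_for_user_py_alt (user_id : String) : List (String × List String) :=
  let p := pvPROFILES.getD user_id ([], [])
  [("categories", p.1), ("features", p.2)]

-- ===== PRECONDITION & SPEC =====
def Spec_profile_for_user_py (user_id : String) (out : List (String × List String)) : Prop := out = profile_for_user_py_alt user_id
instance (user_id : String) (out : List (String × List String)) : Decidable (Spec_profile_for_user_py user_id out) := by unfold Spec_profile_for_user_py; infer_instance

-- ===== CLAIM (what is proved, stated in full; the proofs are below) =====
def Claim_equal_profile_for_user_py : Prop := ∀ (user_id : String), Dom_profile_for_user_py user_id → Spec_profile_for_user_py user_id (profile_for_user_py user_id)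

-- ===== LEMMAS AND PROOFS =====

-- inner loop over a users list that does not contain uid leaves the lookup unchanged
theorem pv_getD_inner_not_mem (users : List String) (v : List String × List String)
    (d : PySem.Dict String (List String × List String)) (uid : String) (h : uid ∉ users) :
    (users.foldl (fun d u => d.insert u v) d).getD uid ([], []) = d.getD uid ([], []) := by
  induction users generalizing d with
  | nil => rfl
  | cons u rest ih =>
      simp only [List.foldl_cons]
      rw [ih _ (fun hm => h (List.mem_cons_of_mem _ hm)), PySem.Dict.getD_insert,
        if_neg (fun he => h (by simp [he]))]

-- inner loop over a users list containing uid stores v at uid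
theorem pv_getD_inner_mem (users : List String) (v : List String × List String)
    (d : PySem.Dict String (List String × List String)) (uid : String)
    (hnd : users.Nodup) (h : uid ∈ users) :
    (users.foldl (fun d u => d.insert u v) d).getD uid ([], []) = v := by
  induction users generalizing d with
  | nil => cases h
  | cons u rest ih =>
      simp only [List.foldl_cons]
      rcases List.mem_cons.mp h with he | hm
      · subst he
        rw [pv_getD_inner_not_mem _ _ _ _ (List.nodup_cons.mp hnd).1,
          PySem.Dict.getD_insert_self]
      · exact ih _ (List.nodup_cons.mp hnd).2 hm

-- outer loop characterised as a first-match scan, given nodup and pairwise-disjoint users lists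
theorem pv_getD_groups (gs : List (String × (List String × (List String × List String))))
    (d : PySem.Dict String (List String × List String)) (uid : String)
    (hnd : ∀ g ∈ gs, g.2.1.Nodup)
    (hdisj : gs.Pairwise (fun a b => ∀ u ∈ a.2.1, u ∉ b.2.1)) :
    (gs.foldl (fun d g => g.2.1.foldl (fun d u => d.insert u g.2.2) d) d).getD uid ([], []) =
      match gs.find? (fun g => decide (uid ∈ g.2.1)) with
      | some g => g.2.2
      | none => d.getD uid ([], []) := by
  induction gs generalizing d with
  | nil => rfl
  | cons g rest ih =>
      simp only [List.foldl_cons]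
      by_cases hm : uid ∈ g.2.1
      · have hrest : ∀ g' ∈ rest, uid ∉ g'.2.1 := fun g' hg' =>
          (List.pairwise_cons.mp hdisj).1 g' hg' uid hm
        have hfn : rest.find? (fun g => decide (uid ∈ g.2.1)) = none := by
          rw [List.find?_eq_none]
          intro g' hg'
          simpa using hrest g' hg'
        rw [ih _ (fun g' hg' => hnd g' (List.mem_cons_of_mem _ hg'))
          (List.pairwise_cons.mp hdisj).2,
          List.find?_cons_of_pos (by simpa using hm), hfn]
        exact pv_getD_inner_mem _ _ _ _ (hnd g List.mem_cons_self) hm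
      · rw [ih _ (fun g' hg' => hnd g' (List.mem_cons_of_mem _ hg'))
          (List.pairwise_cons.mp hdisj).2,
          List.find?_cons_of_neg (by simpa using hm)]
        cases hf : rest.find? (fun g => decide (uid ∈ g.2.1)) with
        | some g' => rfl
        | none => rw [pv_getD_inner_not_mem _ _ _ _ hm]

-- A's group scan is the same first-match
theorem pv_scan_eq_find (gs : List (String × (List String × (List String × List String))))
    (uid : String) :
    pvScanGroups gs uid =
      match gs.find? (fun g => decide (uid ∈ g.2.1)) with
      | some g => [("categories", g.2.2.1), ("features", g.2.2.2)]
      | none => [("categories", []), ("features", [])] := by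
  induction gs with
  | nil => rfl
  | cons g rest ih =>
      by_cases hm : uid ∈ g.2.1
      · rw [pvScanGroups, if_pos hm, List.find?_cons_of_pos (by simpa using hm)]
      · rw [pvScanGroups, if_neg hm, List.find?_cons_of_neg (by simpa using hm)]
        exact ih

theorem pv_groups_nodup : ∀ g ∈ pvGroups, g.2.1.Nodup := by decide

theorem pv_groups_disj :
    pvGroups.Pairwise (fun a b => ∀ u ∈ a.2.1, u ∉ b.2.1) := by decide

-- ===== VERDICT (by name: the statement is the Claim_ definition above) =====
set_option maxRecDepth 40000 in
theorem profile_for_user_py_spec : Claim_equal_profile_for_user_py := by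
  intro uid _
  unfold Spec_profile_for_user_py
  show profile_for_user_py uid = profile_for_user_py_alt uid
  unfold profile_for_user_py profile_for_user_py_alt pvPROFILES
  rw [pv_getD_groups _ _ _ pv_groups_nodup pv_groups_disj]
  by_cases h1 : uid = "u_001"
  · subst h1
    rw [if_pos rfl, show pvGroups.find? (fun g => decide (("u_001" : String) ∈ g.2.1)) = none from by decide]
    decide
  rw [if_neg h1]
  by_cases h2 : uid = "u_002"
  · subst h2
    rw [if_pos rfl, show pvGroups.find? (fun g => decide (("u_002" : String) ∈ g.2.1)) = none from by decide]
    decide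
  rw [if_neg h2]
  by_cases h3 : uid = "u_003"
  · subst h3
    rw [if_pos rfl, show pvGroups.find? (fun g => decide (("u_003" : String) ∈ g.2.1)) = none from by decide]
    decide
  rw [if_neg h3]
  by_cases h4 : uid = "u_004"
  · subst h4
    rw [if_pos rfl, show pvGroups.find? (fun g => decide (("u_004" : String) ∈ g.2.1)) = none from by decide]
    decide
  rw [if_neg h4]
  by_cases h5 : uid = "u_005"
  · subst h5
    rw [if_pos rfl, show pvGroups.find? (fun g => decide (("u_005" : String) ∈ g.2.1)) = none from by decide]
    decide
  rw [if_neg h5, pv_scan_eq_find]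
  have hbase : pvBaseDict.getD uid ([], []) = ([], []) := by
    unfold pvBaseDict
    rw [PySem.Dict.getD_insert, if_neg h5, PySem.Dict.getD_insert, if_neg h4,
      PySem.Dict.getD_insert, if_neg h3, PySem.Dict.getD_insert, if_neg h2,
      PySem.Dict.getD_insert, if_neg h1]
    rfl
  cases hf : pvGroups.find? (fun g => decide (uid ∈ g.2.1)) with
  | some g => rfl
  | none => rw [hbase]
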